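-- pv_equiv track=rewrite | github.com/leuel-a/simple-vader | src/scripts/simple_vader.py | allcap_differencial
-- ===== SOURCE A (Python) =====
-- from typing import Dict, List
--
-- def allcap_differencial(words: List[str]) -> bool:
--     """
--     Check whether just some words in the input are ALL CAPS
--     :param list words: The words to inspect
--     :returns: `True` if some but not all items in `words` are ALL CAPS
--     """
--     is_different = False
--     allcap_words = 0
--
--     for word in words:
--         if word.isupper():
--             allcap_words += 1
--
--     cap_differential = len(words) - allcap_words
--     if 0 < cap_differential < len(words):
--         is_different = True
--
--     return is_different
-- ===== SOURCE B (Python) =====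
-- from typing import List
--
-- def allcap_differencial(words: List[str]) -> bool:
--     """True iff some but not all items in `words` are ALL CAPS."""
--     return len({w.isupper() for w in words}) == 2
-- ===== Notes on version B (the rewrite author's own statement) =====
-- stated objective: simpler
-- what changed: Replaces the counter loop and length-difference arithmetic with a set of per-word isupper() flags: some-but-not-all are ALL CAPS exactly when both flag values occur, i.e. the flag set has size 2.
import Mathlib
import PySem

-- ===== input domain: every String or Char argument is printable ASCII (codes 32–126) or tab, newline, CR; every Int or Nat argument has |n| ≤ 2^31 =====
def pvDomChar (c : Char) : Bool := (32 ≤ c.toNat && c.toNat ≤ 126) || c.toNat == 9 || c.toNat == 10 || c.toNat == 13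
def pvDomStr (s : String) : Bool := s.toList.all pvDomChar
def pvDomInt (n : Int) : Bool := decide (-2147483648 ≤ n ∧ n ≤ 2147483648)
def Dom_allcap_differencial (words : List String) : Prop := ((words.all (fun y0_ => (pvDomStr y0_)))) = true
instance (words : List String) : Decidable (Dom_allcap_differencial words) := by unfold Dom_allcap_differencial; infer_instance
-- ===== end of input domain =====

-- B replaces A's counter loop and length arithmetic with a set of the per-word
-- isupper() flags: some-but-not-all iff that set has exactly 2 elements (simpler).

-- str.isupper(): at least one cased char and no lowercase cased char (exact on ASCII:
-- cased ASCII chars are exactly the letters). Ported by hand from CPython's rule.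
def pyStrIsupper (s : String) : Bool :=
  s.toList.any PySem.Chars.isupper && !(s.toList.any PySem.Chars.islower)

-- ===== PORT A =====
def allcap_differencial (words : List String) : Bool :=
  let allcap_words : Int :=
    words.foldl (fun acc w => if pyStrIsupper w then acc + 1 else acc) 0
  let cap_differential : Int := (words.length : Int) - allcap_words
  if 0 < cap_differential ∧ cap_differential < (words.length : Int) then true else false

-- ===== PORT B =====
def allcap_differencial_alt (words : List String) : Bool :=
  (PySem.Set.len (PySem.Set.ofList (words.map (fun w => pyStrIsupper w)))) == 2

-- ===== PRECONDITION & SPEC =====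
def Spec_allcap_differencial (words : List String) (out : Bool) : Prop := out = allcap_differencial_alt words
instance (words : List String) (out : Bool) : Decidable (Spec_allcap_differencial words out) := by unfold Spec_allcap_differencial; infer_instance

-- ===== CLAIM =====
def Claim_equal_allcap_differencial : Prop := ∀ (words : List String), Dom_allcap_differencial words → Spec_allcap_differencial words (allcap_differencial words)

-- ===== LEMMAS AND PROOFS =====

-- A's counting loop computes countP.
theorem foldl_count_eq_countP (words : List String) (acc : Int) :
    words.foldl (fun acc w => if pyStrIsupper w then acc + 1 else acc) acc
      = acc + (words.countP (fun w => pyStrIsupper w) : Int) := by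
  induction words generalizing acc with
  | nil => simp
  | cons w ws ih =>
      simp only [List.foldl_cons, List.countP_cons, ih]
      split_ifs with h <;> push_cast <;> ring

-- A nodup list of Bools has exactly 2 elements iff both true and false occur in it.
theorem nodup_bool_length_two_iff (l : List Bool) (hn : l.Nodup) :
    l.length = 2 ↔ (true ∈ l ∧ false ∈ l) := by
  constructor
  · intro h2
    have hcard : l.toFinset.card = 2 := by
      rw [List.toFinset_card_of_nodup hn, h2]
    have huniv : l.toFinset = Finset.univ := by
      apply Finset.eq_univ_of_card
      simp [hcard]
    constructor <;>
      · rw [← List.mem_toFinset, huniv]; exact Finset.mem_univ _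
  · rintro ⟨ht, hf⟩
    have hle : l.length ≤ 2 := by
      have := List.Nodup.length_le_card hn
      simpa using this
    have hge : 2 ≤ l.toFinset.card := by
      have hsub : ({true, false} : Finset Bool) ⊆ l.toFinset := by
        intro b hb
        rcases Finset.mem_insert.mp hb with h | h
        · subst h; exact List.mem_toFinset.mpr ht
        · simp only [Finset.mem_singleton] at h; subst h; exact List.mem_toFinset.mpr hf
      calc 2 = ({true, false} : Finset Bool).card := by decide
        _ ≤ l.toFinset.card := Finset.card_le_card hsub
    rw [List.toFinset_card_of_nodup hn] at hge
    omega

-- set of the mapped flags contains exactly-2 iff both flag values occur among the words.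
theorem set_flags_len_two (words : List String) :
    ((PySem.Set.len (PySem.Set.ofList (words.map (fun w => pyStrIsupper w)))) == 2) = true
      ↔ ((∃ w ∈ words, pyStrIsupper w = true) ∧ (∃ w ∈ words, pyStrIsupper w = false)) := by
  rw [beq_iff_eq]
  have h := nodup_bool_length_two_iff (PySem.Set.ofList (words.map (fun w => pyStrIsupper w)))
    (PySem.Set.nodup_ofList _)
  unfold PySem.Set.len
  rw [show ((2:Int) = ((2:Nat):Int)) from rfl, Int.natCast_inj, h]
  simp only [PySem.Set.mem_ofList, List.mem_map]

-- ===== VERDICT =====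
theorem allcap_differencial_spec : Claim_equal_allcap_differencial := by
  intro words _
  unfold Spec_allcap_differencial allcap_differencial allcap_differencial_alt
  simp only [foldl_count_eq_countP, zero_add]
  rw [Bool.eq_iff_iff, set_flags_len_two]
  have hle : words.countP (fun w => pyStrIsupper w) ≤ words.length := List.countP_le_length
  split_ifs with hc
  · refine iff_of_true rfl ?_
    obtain ⟨h1, h2⟩ := hc
    have hpos : 0 < words.countP (fun w => pyStrIsupper w) := by omega
    have hlt : words.countP (fun w => pyStrIsupper w) < words.length := by omega
    refine ⟨List.countP_pos_iff.mp hpos, ?_⟩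
    by_contra hnone
    push Not at hnone
    have hall : ∀ w ∈ words, pyStrIsupper w = true := by
      intro w hw
      cases hpw : pyStrIsupper w with
      | true => rfl
      | false => exact absurd hpw (hnone w hw)
    have : words.countP (fun w => pyStrIsupper w) = words.length :=
      List.countP_eq_length.mpr hall
    omega
  · refine iff_of_false (by simp) ?_
    rintro ⟨⟨w1, hw1, hp1⟩, ⟨w2, hw2, hp2⟩⟩
    apply hc
    have hpos : 0 < words.countP (fun w => pyStrIsupper w) :=
      List.countP_pos_iff.mpr ⟨w1, hw1, hp1⟩
    have hlt : words.countP (fun w => pyStrIsupper w) < words.length := by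
      rcases Nat.lt_or_ge (words.countP (fun w => pyStrIsupper w)) words.length with h | h
      · exact h
      · have := List.countP_eq_length.mp (Nat.le_antisymm hle h) w2 hw2
        rw [this] at hp2
        exact absurd hp2 (by simp)
    constructor <;> omega
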